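-- pv_equiv track=rewrite | github.com/Chanho98/AlgorithmStudy | Greedy_algorism/지각_벌금_적게_내기.py | min_fee
-- ===== SOURCE A (Python) =====
-- def min_fee(pages_to_print):
--     # 벌금을 담을 변수 생성
--     penalty_sum = 0
--     people_to_pay = len(pages_to_print)
--
--     # 내림차순으로 정리하여 주는 것이 Point다
--     pages_to_print.sort()
--
--     # 프린트를 적은 수부터 뽑아주고 제거해준다.
--     for page in pages_to_print:
--         penalty_sum += page * people_to_pay
--         people_to_pay -= 1
--
--
--     return penalty_sum
-- ===== SOURCE B (Python) =====
-- def min_fee(pages_to_print):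
--     # Sort in place (same mutation as A), then aggregate by runs of equal values:
--     # a run of c equal values v, with m people still waiting before it, costs
--     # v * (m + (m-1) + ... + (m-c+1)) = v * (c*m - c*(c-1)//2).
--     pages_to_print.sort()
--     n = len(pages_to_print)
--     total = 0
--     remaining = n
--     i = 0
--     while i < n:
--         j = i
--         while j < n and pages_to_print[j] == pages_to_print[i]:
--             j += 1
--         c = j - i
--         total += pages_to_print[i] * (c * remaining - c * (c - 1) // 2)
--         remaining -= c
--         i = j
--     return total
-- ===== Notes on version B (the rewrite author's own statement) =====
-- stated objective: alternative
-- what changed: B aggregates the sorted list by runs of equal values and adds a closed-form triangular-weight term v*(c*remaining - c*(c-1)//2) per run, instead of A's per-element multiplication by a descending people counter; both sort the argument in place.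
import Mathlib
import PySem

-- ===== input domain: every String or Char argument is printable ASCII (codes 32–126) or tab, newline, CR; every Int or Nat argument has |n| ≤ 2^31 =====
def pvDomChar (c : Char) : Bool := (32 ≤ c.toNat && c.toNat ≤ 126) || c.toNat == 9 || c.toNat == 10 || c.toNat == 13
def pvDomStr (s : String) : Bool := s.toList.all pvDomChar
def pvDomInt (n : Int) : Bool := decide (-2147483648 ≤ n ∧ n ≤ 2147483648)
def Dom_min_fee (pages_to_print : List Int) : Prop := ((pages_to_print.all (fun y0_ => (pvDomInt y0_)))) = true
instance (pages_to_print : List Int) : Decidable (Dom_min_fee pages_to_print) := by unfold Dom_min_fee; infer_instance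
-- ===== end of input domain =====

-- B aggregates the in-place-sorted list by runs of equal values with a closed-form triangular
-- weight per run, instead of A's per-element descending counter; same in-place sort mutation,
-- same O(n log n) cost (objective: alternative).
-- ===== PORT A =====
-- loop state: (penalty_sum, people_to_pay)
def minFeeLoopA (l : List Int) (st : Int × Int) : Int × Int :=
  l.foldl (fun st page => (st.1 + page * st.2, st.2 - 1)) st

def min_fee (pages_to_print : List Int) : Int :=
  let people_to_pay : Int := pages_to_print.length
  let sorted := PySem.List.sorted pages_to_print (fun x => x) false
  (minFeeLoopA sorted (0, people_to_pay)).1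

-- ===== PORT B =====
-- length of the leading run of elements equal to v (the inner 'while ... == ...' scan)
def runLen (v : Int) : List Int → Nat
  | [] => 0
  | x :: xs => if x = v then runLen v xs + 1 else 0

theorem runLen_cons_self (v : Int) (xs : List Int) :
    runLen v (v :: xs) = runLen v xs + 1 := by simp [runLen]

-- outer while loop: consume one run per step; state (total, remaining)
def minFeeLoopB : List Int → Int → Int → Int
  | [], total, _ => total
  | v :: xs, total, remaining =>
      let c : Nat := runLen v (v :: xs)
      minFeeLoopB ((v :: xs).drop c)
        (total + v * ((c : Int) * remaining - PySem.Int.floordiv ((c : Int) * ((c : Int) - 1)) 2))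
        (remaining - (c : Int))
termination_by l _ _ => l.length
decreasing_by
  simp only [runLen_cons_self, List.length_drop, List.length_cons]; omega

def min_fee_alt (pages_to_print : List Int) : Int :=
  let sorted := PySem.List.sorted pages_to_print (fun x => x) false
  minFeeLoopB sorted 0 (sorted.length : Int)

-- ===== PRECONDITION & SPEC =====
def Spec_min_fee (pages_to_print : List Int) (out : Int) : Prop := out = min_fee_alt pages_to_print
instance (pages_to_print : List Int) (out : Int) : Decidable (Spec_min_fee pages_to_print out) := by unfold Spec_min_fee; infer_instance

-- ===== CLAIM (what is proved, stated in full; the proofs are below) =====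
def Claim_equal_min_fee : Prop := ∀ (pages_to_print : List Int), Dom_min_fee pages_to_print → Spec_min_fee pages_to_print (min_fee pages_to_print)

-- ===== LEMMAS AND PROOFS =====
theorem minFeeLoopA_shift (l : List Int) (p m : Int) :
    (minFeeLoopA l (p, m)).1 = p + (minFeeLoopA l (0, m)).1 := by
  induction l generalizing p m with
  | nil => simp [minFeeLoopA]
  | cons a xs ih =>
    simp only [minFeeLoopA, List.foldl_cons] at *
    rw [ih (p + a * m), ih (0 + a * m)]
    ring

theorem minFeeLoopA_cons (a : Int) (l : List Int) (st : Int × Int) :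
    minFeeLoopA (a :: l) st = minFeeLoopA l (st.1 + a * st.2, st.2 - 1) := by
  simp [minFeeLoopA]

theorem minFeeLoopA_append (l1 l2 : List Int) (st : Int × Int) :
    minFeeLoopA (l1 ++ l2) st = minFeeLoopA l2 (minFeeLoopA l1 st) := by
  simp [minFeeLoopA, List.foldl_append]

theorem minFeeLoopA_snd (l : List Int) (st : Int × Int) :
    (minFeeLoopA l st).2 = st.2 - l.length := by
  induction l generalizing st with
  | nil => simp [minFeeLoopA]
  | cons a xs ih =>
    simp only [minFeeLoopA, List.foldl_cons] at *
    rw [ih]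
    simp only [List.length_cons]
    push_cast; ring

theorem tri_floordiv (c : Nat) :
    PySem.Int.floordiv ((c : Int) * ((c : Int) - 1)) 2 = ((c * (c - 1) / 2 : Nat) : Int) := by
  cases c with
  | zero => simp [PySem.Int.floordiv]
  | succ d =>
    have h : ((d + 1 : Nat) : Int) * (((d + 1 : Nat) : Int) - 1) = (((d + 1) * d : Nat) : Int) := by
      push_cast; ring
    rw [h]
    simp only [Nat.add_sub_cancel]
    exact_mod_cast PySem.Int.floordiv_natCast ((d + 1) * d) 2

-- A over a run of c copies of v starting with counter m adds v * (c*m - c*(c-1)/2)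
theorem minFeeLoopA_replicate (c : Nat) (v m : Int) :
    (minFeeLoopA (List.replicate c v) (0, m)).1
      = v * ((c : Int) * m - ((c * (c - 1) / 2 : Nat) : Int)) := by
  induction c generalizing m with
  | zero => simp [minFeeLoopA]
  | succ d ih =>
    rw [List.replicate_succ, minFeeLoopA_cons, minFeeLoopA_shift, ih (m - 1)]
    simp only [Nat.add_sub_cancel]
    have htri : (((d + 1) * d / 2 : Nat) : Int) = ((d * (d - 1) / 2 : Nat) : Int) + d := by
      have hnat : (d + 1) * d / 2 = d * (d - 1) / 2 + d := by
        cases d with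
        | zero => rfl
        | succ e =>
          obtain ⟨k, hk⟩ := Nat.even_mul_succ_self e
          have h1 : (e + 1 + 1) * (e + 1) = e * (e + 1) + 2 * (e + 1) := by ring
          have h2 : (e + 1) * (e + 1 - 1) = e * (e + 1) := by
            simp only [Nat.add_sub_cancel]; ring
          rw [h1, h2, hk]
          omega
      rw [hnat]; push_cast; ring
    rw [htri]
    push_cast; ring

theorem replicate_runLen_append (v : Int) (l : List Int) :
    List.replicate (runLen v l) v ++ l.drop (runLen v l) = l := by
  induction l with
  | nil => simp [runLen]
  | cons x xs ih =>
    by_cases h : x = v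
    · subst h
      rw [runLen_cons_self, List.replicate_succ]
      simpa using ih
    · simp [runLen, h]

theorem minFeeLoopB_eq (l : List Int) (total m : Int) :
    minFeeLoopB l total m = total + (minFeeLoopA l (0, m)).1 := by
  induction hn : l.length using Nat.strong_induction_on generalizing l total m with
  | _ n ih =>
    cases l with
    | nil => rw [minFeeLoopB.eq_def]; simp [minFeeLoopA]
    | cons v xs =>
      rw [minFeeLoopB.eq_def]
      dsimp only
      have hc : 1 ≤ runLen v (v :: xs) := by rw [runLen_cons_self]; omega
      have hlt : ((v :: xs).drop (runLen v (v :: xs))).length < n := by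
        simp only [List.length_drop]
        subst hn
        simp only [List.length_cons]
        omega
      rw [ih _ hlt _ _ _ rfl]
      conv_rhs => rw [← replicate_runLen_append v (v :: xs)]
      rw [minFeeLoopA_append, minFeeLoopA_shift]
      have hsnd := minFeeLoopA_snd (List.replicate (runLen v (v :: xs)) v) (0, m)
      have hfst := minFeeLoopA_replicate (runLen v (v :: xs)) v m
      rcases hst : minFeeLoopA (List.replicate (runLen v (v :: xs)) v) (0, m) with ⟨p, q⟩
      rw [hst] at hsnd hfst
      simp only [List.length_replicate] at hsnd
      simp only at hsnd hfst
      rw [hsnd, hfst, tri_floordiv]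
      conv_rhs => rw [minFeeLoopA_shift]
      ring

-- ===== VERDICT (by name: the statement is the Claim_ definition above) =====
theorem min_fee_spec : Claim_equal_min_fee := by
  intro l _
  unfold Spec_min_fee min_fee min_fee_alt
  rw [minFeeLoopB_eq]
  simp [PySem.List.length_sorted]
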